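-- pv_equiv track=rewrite | github.com/TokiPereyra/PracticaPython | ejercicios_python/Clase02/diccionario_geringoso.py | traduccion_geringoso
-- ===== SOURCE A (Python) =====
-- def traduccion_geringoso(palabra):
--     traduccion = ''
--     for i in palabra:
--         if i in 'aeiou':
--             traduccion = traduccion + i + 'p' + i
--         else:
--             traduccion = traduccion + i
--     return traduccion
-- ===== SOURCE B (Python) =====
-- def traduccion_geringoso(palabra):
--     for v in 'aeiou':
--         palabra = palabra.replace(v, v + 'p' + v)
--     return palabra
-- ===== Notes on version B (the rewrite author's own statement) =====
-- stated objective: idiomatic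
-- what changed: Replaced the character-by-character Python-level accumulator loop (quadratic string concatenation) with five whole-string str.replace passes, one per vowel; safe because each pass inserts only the padding letter and copies of the vowel it just processed, which later passes never match.
import Mathlib
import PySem

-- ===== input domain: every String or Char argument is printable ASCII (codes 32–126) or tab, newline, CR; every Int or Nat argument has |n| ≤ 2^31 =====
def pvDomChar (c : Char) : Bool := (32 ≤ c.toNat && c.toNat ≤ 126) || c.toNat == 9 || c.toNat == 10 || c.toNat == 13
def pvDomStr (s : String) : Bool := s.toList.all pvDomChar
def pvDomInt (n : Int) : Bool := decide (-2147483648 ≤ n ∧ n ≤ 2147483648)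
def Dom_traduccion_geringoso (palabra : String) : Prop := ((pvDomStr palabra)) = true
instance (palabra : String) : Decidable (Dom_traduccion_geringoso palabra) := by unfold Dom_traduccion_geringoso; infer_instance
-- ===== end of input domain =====

-- B replaces the character-by-character accumulator loop by five whole-string str.replace passes
-- (one per vowel); idiomatic, same exact output on all strings.


-- ===== PORT A =====
-- for i in palabra: if i in 'aeiou': traduccion += i + 'p' + i else: traduccion += i
def traduccion_geringoso (palabra : String) : String :=
  palabra.toList.foldl
    (fun traduccion i =>
      if PySem.Str.isIn (String.ofList [i]) "aeiou" then
        traduccion ++ String.ofList [i] ++ "p" ++ String.ofList [i]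
      else
        traduccion ++ String.ofList [i])
    ""

-- ===== PORT B =====
-- for v in 'aeiou': palabra = palabra.replace(v, v + 'p' + v); return palabra
def traduccion_geringoso_alt (palabra : String) : String :=
  "aeiou".toList.foldl
    (fun s v => PySem.Str.replace s (String.ofList [v]) (String.ofList [v] ++ "p" ++ String.ofList [v]))
    palabra

-- ===== PRECONDITION & SPEC =====
def Spec_traduccion_geringoso (palabra : String) (out : String) : Prop := out = traduccion_geringoso_alt palabra
instance (palabra : String) (out : String) : Decidable (Spec_traduccion_geringoso palabra out) := by unfold Spec_traduccion_geringoso; infer_instance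

-- ===== CLAIM (what is proved, stated in full; the proofs are below) =====
def Claim_equal_traduccion_geringoso : Prop := ∀ (palabra : String), Dom_traduccion_geringoso palabra → Spec_traduccion_geringoso palabra (traduccion_geringoso palabra)

-- ===== LEMMAS AND PROOFS =====

-- replace with a single-char pattern is a flatMap over the characters
theorem go_single (v : Char) (new : List Char) :
    ∀ (cs : List Char) (fuel : Nat) (acc : List Char), cs.length ≤ fuel →
    PySem.Chars.replace.go [v] new fuel cs acc
      = acc.reverse ++ cs.flatMap (fun c => if c = v then new else [c]) := by
  intro cs
  induction cs with
  | nil => intro fuel acc _; cases fuel <;> simp [PySem.Chars.replace.go]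
  | cons c t ih =>
    intro fuel acc h
    cases fuel with
    | zero => simp at h
    | succ f =>
      have step : PySem.Chars.replace.go [v] new (f+1) (c::t) acc
          = if List.isPrefixOf [v] (c::t) then PySem.Chars.replace.go [v] new f (List.drop 1 (c::t)) (new.reverse ++ acc)
            else PySem.Chars.replace.go [v] new f t (c :: acc) := rfl
      rw [step]
      have hlen : t.length ≤ f := by simpa using h
      by_cases hc : c = v
      · subst hc
        simp only [List.isPrefixOf, Bool.and_true, beq_self_eq_true, if_pos,
          List.drop_succ_cons, List.drop_zero, ih f _ hlen]
        simp
      · have hp : List.isPrefixOf [v] (c::t) = false := by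
          simp [List.isPrefixOf]; exact fun h' => absurd h'.symm hc
        rw [hp]
        simp only [Bool.false_eq_true, if_false, ih f _ hlen]
        simp [hc]

theorem replace_single (v : Char) (new cs : List Char) :
    PySem.Chars.replace cs [v] new = cs.flatMap (fun c => if c = v then new else [c]) := by
  simpa using go_single v new cs cs.length [] le_rfl

-- per-character expansion for a vowel list
def expandVs (vs : List Char) (c : Char) : List Char := if c ∈ vs then [c, 'p', c] else [c]

-- folding single-vowel flatMap passes over a vowel list with distinct, non-'p' vowels
theorem foldl_flatMap_expand (vs : List Char) :
    ∀ (cs : List Char), vs.Nodup → 'p' ∉ vs →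
    vs.foldl (fun s v => s.flatMap (fun c => if c = v then [v, 'p', v] else [c])) cs
      = cs.flatMap (expandVs vs) := by
  induction vs with
  | nil =>
    intro cs _ _
    have he : expandVs [] = fun c => [c] := funext fun c => by simp [expandVs]
    simp only [List.foldl_nil, he]
    exact (List.flatMap_singleton' cs).symm
  | cons v vs ih =>
    intro cs hnd hp
    have hvnot : v ∉ vs := (List.nodup_cons.mp hnd).1
    have hpnot : 'p' ∉ vs := fun h => hp (List.mem_cons_of_mem _ h)
    simp only [List.foldl_cons]
    rw [ih _ (List.nodup_cons.mp hnd).2 hpnot, List.flatMap_assoc]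
    apply List.flatMap_congr
    intro c _
    by_cases hc : c = v
    · subst hc
      simp [expandVs, hvnot, hpnot]
    · simp [expandVs, hc]

-- A's accumulator loop, seen on character lists
theorem foldlA_toList (cs : List Char) :
    ∀ (acc : String),
    (cs.foldl
      (fun traduccion i =>
        if PySem.Str.isIn (String.ofList [i]) "aeiou" then
          traduccion ++ String.ofList [i] ++ "p" ++ String.ofList [i]
        else
          traduccion ++ String.ofList [i]) acc).toList
      = acc.toList ++ cs.flatMap (expandVs "aeiou".toList) := by
  induction cs with
  | nil => intro acc; simp
  | cons c t ih =>
    intro acc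
    have hmem : PySem.Str.isIn (String.ofList [c]) "aeiou" = true ↔ c ∈ "aeiou".toList := by
      rw [PySem.Str.isIn_iff_infix, String.toList_ofList]
      constructor
      · intro h
        rcases h with ⟨p, s, hps⟩
        have hm : c ∈ p ++ [c] ++ s := by simp
        rw [hps] at hm; exact hm
      · intro h
        rcases List.mem_iff_append.mp h with ⟨p, s, hps⟩
        exact ⟨p, s, by simp [hps]⟩
    simp only [List.foldl_cons]
    by_cases hc : c ∈ "aeiou".toList
    · rw [if_pos (hmem.mpr hc), ih]
      have : c ∈ ['a','e','i','o','u'] := hc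
      fin_cases this <;> simp [expandVs]
    · rw [if_neg (fun h => hc (hmem.mp h)), ih]
      have hc' : ¬(c = 'a' ∨ c = 'e' ∨ c = 'i' ∨ c = 'o' ∨ c = 'u') := by simpa using hc
      simp [expandVs, hc']

-- ===== VERDICT (by name: the statement is the Claim_ definition above) =====
theorem traduccion_geringoso_spec : Claim_equal_traduccion_geringoso := by
  intro palabra _
  unfold Spec_traduccion_geringoso traduccion_geringoso traduccion_geringoso_alt
  apply String.toList_inj.mp
  rw [foldlA_toList]
  have hB : ∀ (s : String),
      ("aeiou".toList.foldl
        (fun s v => PySem.Str.replace s (String.ofList [v]) (String.ofList [v] ++ "p" ++ String.ofList [v]))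
        s).toList
      = "aeiou".toList.foldl
          (fun l v => l.flatMap (fun c => if c = v then [v, 'p', v] else [c])) s.toList := by
    intro s
    show (List.foldl _ s ['a','e','i','o','u']).toList = _
    simp only [List.foldl_cons, List.foldl_nil]
    simp only [PySem.Str.replace]
    simp [replace_single]
  rw [hB, foldl_flatMap_expand "aeiou".toList palabra.toList (by decide) (by decide)]
  simp
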